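-- pv_equiv track=rewrite | github.com/EjLaquiorez/FscanV2 | models/fusion_engine.py | _check_ripeness_agreement
-- ===== SOURCE A (Python) =====
-- def _check_ripeness_agreement(yolo_ripeness: str, nir_ripeness: str) -> bool:
--     """
--     Check if YOLO and NIR ripeness assessments agree
--
--     Args:
--         yolo_ripeness: YOLO ripeness assessment (lowercase)
--         nir_ripeness: NIR ripeness assessment (lowercase)
--
--     Returns:
--         True if assessments agree, False otherwise
--     """
--     # Define ripeness categories
--     unripe_keywords = ['unripe', 'underripe']
--     half_ripe_keywords = ['half-ripe', 'half ripe']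
--     ripe_keywords = ['ripe']
--     overripe_keywords = ['overripe', 'over-ripe']
--
--     # Categorize YOLO ripeness
--     yolo_category = None
--     if any(kw in yolo_ripeness for kw in unripe_keywords):
--         yolo_category = 'unripe'
--     elif any(kw in yolo_ripeness for kw in half_ripe_keywords):
--         yolo_category = 'half-ripe'
--     elif any(kw in yolo_ripeness for kw in ripe_keywords) and not any(kw in yolo_ripeness for kw in overripe_keywords):
--         yolo_category = 'ripe'
--     elif any(kw in yolo_ripeness for kw in overripe_keywords):
--         yolo_category = 'overripe'
--
--     # Categorize NIR ripeness
--     nir_category = None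
--     if any(kw in nir_ripeness for kw in unripe_keywords):
--         nir_category = 'unripe'
--     elif any(kw in nir_ripeness for kw in half_ripe_keywords):
--         nir_category = 'half-ripe'
--     elif any(kw in nir_ripeness for kw in ripe_keywords) and not any(kw in nir_ripeness for kw in overripe_keywords):
--         nir_category = 'ripe'
--     elif any(kw in nir_ripeness for kw in overripe_keywords):
--         nir_category = 'overripe'
--
--     # Check agreement (allow adjacent categories as agreement)
--     if yolo_category == nir_category:
--         return True
--     elif yolo_category and nir_category:
--         # Check if categories are adjacent (e.g., unripe and half-ripe)
--         category_order = ['unripe', 'half-ripe', 'ripe', 'overripe']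
--         try:
--             yolo_idx = category_order.index(yolo_category)
--             nir_idx = category_order.index(nir_category)
--             return abs(yolo_idx - nir_idx) <= 1
--         except ValueError:
--             return False
--
--     return False
-- ===== SOURCE B (Python) =====
-- # Direct boolean agreement conditions on independent keyword flags: no category
-- # values, no ordering list, no index arithmetic -- disagreement is spelled out
-- # as "one reads unripe while the other is past half-ripe, or one reads
-- # half-ripe while the other reads overripe".
--
-- def _flags(s):
--     u = 'unripe' in s or 'underripe' in s
--     h = 'half-ripe' in s or 'half ripe' in s
--     r = 'ripe' in s
--     o = 'overripe' in s or 'over-ripe' in s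
--     return u, h, r, o
--
--
-- def _check_ripeness_agreement(yolo_ripeness: str, nir_ripeness: str) -> bool:
--     uy, hy, ry, oy = _flags(yolo_ripeness)
--     un, hn, rn, on = _flags(nir_ripeness)
--     some_y = uy or hy or ry or oy
--     some_n = un or hn or rn or on
--     if not (some_y and some_n):
--         # a side with no ripeness keyword agrees only with another such side
--         return some_y == some_n
--     # the only non-adjacent readings: unripe vs {ripe, overripe}, half-ripe vs overripe
--     far = ((uy and not (un or hn)) or (un and not (uy or hy))
--            or (hy and not uy and on and not (un or hn))
--            or (hn and not un and oy and not (uy or hy)))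
--     return not far
-- ===== Notes on version B (the rewrite author's own statement) =====
-- stated objective: alternative
-- what changed: Drops A's classify-then-compare design entirely: instead of building a category per string and measuring index distance in an ordered list (with try/except), B computes four independent keyword flags per string and returns one boolean formula naming the only disagreeing combinations (unripe vs past-half-ripe, half-ripe vs overripe).
import Mathlib
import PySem

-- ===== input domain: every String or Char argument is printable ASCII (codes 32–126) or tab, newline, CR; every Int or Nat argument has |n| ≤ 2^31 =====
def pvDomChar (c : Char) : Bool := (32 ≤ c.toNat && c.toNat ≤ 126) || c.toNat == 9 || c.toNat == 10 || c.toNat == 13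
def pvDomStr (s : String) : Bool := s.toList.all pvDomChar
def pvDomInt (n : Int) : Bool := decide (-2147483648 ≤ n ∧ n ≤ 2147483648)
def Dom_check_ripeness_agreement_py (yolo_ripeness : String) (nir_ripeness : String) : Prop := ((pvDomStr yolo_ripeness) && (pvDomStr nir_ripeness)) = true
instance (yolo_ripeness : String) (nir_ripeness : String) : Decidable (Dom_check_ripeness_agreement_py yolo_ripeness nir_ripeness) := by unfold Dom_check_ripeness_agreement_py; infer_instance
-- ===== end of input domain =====

-- B drops A's classify-then-compare-indices design for one direct boolean formula over
-- per-string keyword flags (objective: alternative); return values are proved equal.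

-- ===== PORT A =====
def check_ripeness_agreement_py (yolo_ripeness : String) (nir_ripeness : String) : Bool :=
  let unripe_keywords := ["unripe", "underripe"]
  let half_ripe_keywords := ["half-ripe", "half ripe"]
  let ripe_keywords := ["ripe"]
  let overripe_keywords := ["overripe", "over-ripe"]
  -- Categorize YOLO ripeness (the elif chain, branch for branch)
  let yolo_category : Option String :=
    if unripe_keywords.any (fun kw => PySem.Str.isIn kw yolo_ripeness) then some "unripe"
    else if half_ripe_keywords.any (fun kw => PySem.Str.isIn kw yolo_ripeness) then some "half-ripe"
    else if ripe_keywords.any (fun kw => PySem.Str.isIn kw yolo_ripeness) &&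
            !(overripe_keywords.any (fun kw => PySem.Str.isIn kw yolo_ripeness)) then some "ripe"
    else if overripe_keywords.any (fun kw => PySem.Str.isIn kw yolo_ripeness) then some "overripe"
    else none
  -- Categorize NIR ripeness (the same chain repeated, as in the Python)
  let nir_category : Option String :=
    if unripe_keywords.any (fun kw => PySem.Str.isIn kw nir_ripeness) then some "unripe"
    else if half_ripe_keywords.any (fun kw => PySem.Str.isIn kw nir_ripeness) then some "half-ripe"
    else if ripe_keywords.any (fun kw => PySem.Str.isIn kw nir_ripeness) &&
            !(overripe_keywords.any (fun kw => PySem.Str.isIn kw nir_ripeness)) then some "ripe"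
    else if overripe_keywords.any (fun kw => PySem.Str.isIn kw nir_ripeness) then some "overripe"
    else none
  if yolo_category == nir_category then true
  else
    match yolo_category, nir_category with  -- 'elif yolo_category and nir_category' (a category is never the empty string, so truthiness = is-not-None)
    | some yc, some nc =>
      let category_order := ["unripe", "half-ripe", "ripe", "overripe"]
      -- try: .index twice, abs diff; except ValueError: False
      match PySem.List.index? category_order yc, PySem.List.index? category_order nc with
      | some yolo_idx, some nir_idx => decide (((yolo_idx : Int) - (nir_idx : Int)).natAbs ≤ 1)
      | _, _ => false
    | _, _ => false

-- ===== PORT B =====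
-- (u, h, r, o): independent keyword-presence flags for one string
def pvFlags (s : String) : Bool × Bool × Bool × Bool :=
  (PySem.Str.isIn "unripe" s || PySem.Str.isIn "underripe" s,
   PySem.Str.isIn "half-ripe" s || PySem.Str.isIn "half ripe" s,
   PySem.Str.isIn "ripe" s,
   PySem.Str.isIn "overripe" s || PySem.Str.isIn "over-ripe" s)

def check_ripeness_agreement_py_alt (yolo_ripeness : String) (nir_ripeness : String) : Bool :=
  let (uy, hy, ry, oy) := pvFlags yolo_ripeness
  let (un, hn, rn, on) := pvFlags nir_ripeness
  let some_y := uy || hy || ry || oy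
  let some_n := un || hn || rn || on
  if !(some_y && some_n) then some_y == some_n
  else
    let far := (uy && !(un || hn)) || (un && !(uy || hy)) ||
               (hy && !uy && on && !(un || hn)) || (hn && !un && oy && !(uy || hy))
    !far

-- ===== PRECONDITION & SPEC =====
def Spec_check_ripeness_agreement_py (yolo_ripeness : String) (nir_ripeness : String) (out : Bool) : Prop := out = check_ripeness_agreement_py_alt yolo_ripeness nir_ripeness
instance (yolo_ripeness : String) (nir_ripeness : String) (out : Bool) : Decidable (Spec_check_ripeness_agreement_py yolo_ripeness nir_ripeness out) := by unfold Spec_check_ripeness_agreement_py; infer_instance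

-- ===== CLAIM =====
def Claim_equal_check_ripeness_agreement_py : Prop := ∀ (yolo_ripeness : String) (nir_ripeness : String), Dom_check_ripeness_agreement_py yolo_ripeness nir_ripeness → Spec_check_ripeness_agreement_py yolo_ripeness nir_ripeness (check_ripeness_agreement_py yolo_ripeness nir_ripeness)

-- ===== LEMMAS AND PROOFS =====

-- ===== VERDICT =====
theorem check_ripeness_agreement_py_spec : Claim_equal_check_ripeness_agreement_py := by
  intro y n _
  unfold Spec_check_ripeness_agreement_py check_ripeness_agreement_py check_ripeness_agreement_py_alt pvFlags
  simp only [List.any_cons, List.any_nil, Bool.or_false]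
  generalize (PySem.Str.isIn "unripe" y || PySem.Str.isIn "underripe" y) = uy
  generalize (PySem.Str.isIn "half-ripe" y || PySem.Str.isIn "half ripe" y) = hy
  generalize PySem.Str.isIn "ripe" y = ry
  generalize (PySem.Str.isIn "overripe" y || PySem.Str.isIn "over-ripe" y) = oy
  generalize (PySem.Str.isIn "unripe" n || PySem.Str.isIn "underripe" n) = un
  generalize (PySem.Str.isIn "half-ripe" n || PySem.Str.isIn "half ripe" n) = hn
  generalize PySem.Str.isIn "ripe" n = rn
  generalize (PySem.Str.isIn "overripe" n || PySem.Str.isIn "over-ripe" n) = on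
  cases uy <;> cases hy <;> cases ry <;> cases oy <;>
    cases un <;> cases hn <;> cases rn <;> cases on <;> decide
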